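-- pv_equiv track=rewrite | github.com/pep8speaks/buchschloss | buchschloss/utils.py | break_string
-- ===== SOURCE A (Python) =====
-- import string
--
-- def break_string(text, size, break_char=string.punctuation, cut_char=string.whitespace):
--     """Insert newlines every `size` characters.
--
--     if allow_before is True, break before the set amount of characters
--         if a character in `break_char+cut_char` is encountered
--         if the character is in `cut_char`, it is replace by the newline"""
--     break_char += cut_char
--     r = []
--     while len(text) > size:
--         i = size
--         cut = False
--         while i:
--             if text[i] in break_char:
--                 cut = text[i] in cut_char
--                 break
--             i -= 1
--         else:
--             i = size-1
--         i += 1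
--         r.append(text[:i-cut])
--         text = text[i:]
--     r.append(text)
--     return '\n'.join(r)
-- ===== SOURCE B (Python) =====
-- import string
--
-- def break_string(text, size, break_char=string.punctuation, cut_char=string.whitespace):
--     """Insert newlines every `size` characters, breaking at break/cut chars.
--
--     All break positions are precomputed once; a pointer then slides forward
--     over them, and each line is cut by index arithmetic on the original text."""
--     bset = set(break_char) | set(cut_char)
--     cset = set(cut_char)
--     breaks = [(j, ch in cset) for j, ch in enumerate(text) if ch in bset]
--     out = []
--     s = 0
--     p = 0
--     while len(text) - s > size:
--         limit = s + size
--         while p < len(breaks) and breaks[p][0] <= limit: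
--             p += 1
--         if p and breaks[p - 1][0] > s:
--             j, cut = breaks[p - 1]
--             out.append(text[s:j + 1 - cut])
--             s = j + 1
--         else:
--             out.append(text[s:s + size])
--             s += size
--     out.append(text[s:])
--     return '\n'.join(out)
-- ===== Notes on version B (the rewrite author's own statement) =====
-- stated objective: alternative
-- what changed: Instead of re-scanning a size-wide window backwards through the break-character string and re-slicing the whole remaining text for every line, B precomputes the list of break positions once (set lookups) and slides a single pointer over it, emitting lines by index arithmetic on the original string; on break-dense texts the precomputation makes it no faster overall.
import Mathlib
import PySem

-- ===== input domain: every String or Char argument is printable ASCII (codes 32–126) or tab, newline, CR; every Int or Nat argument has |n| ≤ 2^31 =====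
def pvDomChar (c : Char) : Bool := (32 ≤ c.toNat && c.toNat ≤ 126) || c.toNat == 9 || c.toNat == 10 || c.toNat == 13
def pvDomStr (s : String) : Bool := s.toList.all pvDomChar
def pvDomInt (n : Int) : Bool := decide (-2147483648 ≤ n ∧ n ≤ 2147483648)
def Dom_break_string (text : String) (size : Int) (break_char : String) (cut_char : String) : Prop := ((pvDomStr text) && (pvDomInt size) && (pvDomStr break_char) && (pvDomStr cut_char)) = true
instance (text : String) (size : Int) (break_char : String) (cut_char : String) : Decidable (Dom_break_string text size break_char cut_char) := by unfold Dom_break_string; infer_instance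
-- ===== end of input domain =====

-- B replaces A's per-line backward window scan and repeated re-slicing of the remaining text
-- by one precomputed list of break positions and a forward-sliding pointer (objective:
-- alternative algorithm, same observable behaviour).

-- ===== PORT A =====
-- inner `while i:` loop of A: scans index i = n, n-1, …, 1 of t; on the first (highest) break
-- character returns `some (i, cut)`; returns `none` when the scan falls through (Python's `else`).
def innerA (t bc cc : List Char) : Nat → Option (Nat × Bool)
  | 0 => none
  | i+1 =>
      match t[i+1]? with
      | some ch => if bc.contains ch then some (i+1, cc.contains ch) else innerA t bc cc i
      | none => innerA t bc cc i

-- outer `while len(text) > size:` loop of A; fuel = len(text)+1 bounds the iterations (each one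
-- drops ≥ 1 character when size ≥ 1, so under Pre_ the fuel is never exhausted).
def outerA (bc cc : List Char) (size : Int) : Nat → List Char → List (List Char) → List (List Char)
  | 0, t, r => r ++ [t]
  | fuel+1, t, r =>
      if (t.length : Int) > size then
        match innerA t bc cc size.toNat with
        | some (i, cut) =>
            outerA bc cc size fuel (t.drop (i+1)) (r ++ [t.take (i+1 - (if cut then 1 else 0))])
        | none =>
            outerA bc cc size fuel (t.drop (size.toNat - 1 + 1)) (r ++ [t.take (size.toNat - 1 + 1)])
      else r ++ [t]

def break_string (text : String) (size : Int) (break_char : String) (cut_char : String) : String :=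
  let bc := break_char.toList ++ cut_char.toList        -- break_char += cut_char
  let cc := cut_char.toList
  let t := text.toList
  String.ofList (PySem.Chars.join ['\n'] (outerA bc cc size (t.length + 1) t []))

-- ===== PORT B =====
-- `[(j, ch in cset) for j, ch in enumerate(text) if ch in bset]` of Source B (j carried as Nat).
def breaksOf (bset cset : List Char) : Nat → List Char → List (Nat × Bool)
  | _, [] => []
  | j, ch :: rest =>
      if bset.contains ch then (j, cset.contains ch) :: breaksOf bset cset (j+1) rest
      else breaksOf bset cset (j+1) rest

-- `while p < len(breaks) and breaks[p][0] <= limit: p += 1` of Source B.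
def advance (breaks : List (Nat × Bool)) (limit : Nat) (p : Nat) : Nat :=
  if h : p < breaks.length then
    if (breaks[p]).1 ≤ limit then advance breaks limit (p+1) else p
  else p
termination_by breaks.length - p

-- main `while len(text) - s > size:` loop of Source B; same fuel bound as A's port.
def outerB (t : List Char) (size : Int) (breaks : List (Nat × Bool)) : Nat → Nat → Nat → List (List Char) → List (List Char)
  | 0, s, _, out => out ++ [t.drop s]
  | fuel+1, s, p, out =>
      if (t.length : Int) - (s : Int) > size then
        let p' := advance breaks (s + size.toNat) p
        let cand := breaks.getD (p' - 1) (0, false)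
        if p' ≠ 0 ∧ s < cand.1 then
          outerB t size breaks fuel (cand.1 + 1) p'
            (out ++ [(t.drop s).take (cand.1 + 1 - (if cand.2 then 1 else 0) - s)])
        else
          outerB t size breaks fuel (s + size.toNat) p'
            (out ++ [(t.drop s).take (s + size.toNat - s)])
      else out ++ [t.drop s]

def break_string_alt (text : String) (size : Int) (break_char : String) (cut_char : String) : String :=
  let bset : PySem.Set Char := PySem.Set.union (PySem.Set.ofList break_char.toList) cut_char.toList
  let cset : PySem.Set Char := PySem.Set.ofList cut_char.toList
  let t := text.toList
  let breaks := breaksOf bset cset 0 t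
  String.ofList (PySem.Chars.join ['\n'] (outerB t size breaks (t.length + 1) 0 0 []))

-- ===== PRECONDITION & SPEC =====
-- Pre_ excludes size ≤ 0 with a text longer than size, on which A never returns: its outer loop
-- makes no progress (infinite loop), or raises IndexError via a negative index on short text.
def Pre_break_string (text : String) (size : Int) (break_char : String) (cut_char : String) : Prop :=
  1 ≤ size ∨ (text.toList.length : Int) ≤ size
instance (text : String) (size : Int) (break_char : String) (cut_char : String) : Decidable (Pre_break_string text size break_char cut_char) := by unfold Pre_break_string; infer_instance

def pvWitness_break_string : String × Int × String × String :=
  ("hello, world! this is a test", 7, ".,!?;:", " ")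

def Spec_break_string (text : String) (size : Int) (break_char : String) (cut_char : String) (out : String) : Prop := out = break_string_alt text size break_char cut_char
instance (text : String) (size : Int) (break_char : String) (cut_char : String) (out : String) : Decidable (Spec_break_string text size break_char cut_char out) := by unfold Spec_break_string; infer_instance

-- ===== CLAIM (what is proved, stated in full; the proofs are below) =====
def Claim_equal_break_string : Prop := ∀ (text : String) (size : Int) (break_char : String) (cut_char : String), Dom_break_string text size break_char cut_char → Pre_break_string text size break_char cut_char → Spec_break_string text size break_char cut_char (break_string text size break_char cut_char)

-- ===== LEMMAS AND PROOFS =====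

-- Reference function: last break at an absolute position in (s, s+n], scanning downward.
def lastBrk (t bc cc : List Char) (s : Nat) : Nat → Option (Nat × Bool)
  | 0 => none
  | n+1 =>
      match t[s+n+1]? with
      | some ch => if bc.contains ch then some (s+n+1, cc.contains ch) else lastBrk t bc cc s n
      | none => lastBrk t bc cc s n

theorem innerA_eq_lastBrk (t bc cc : List Char) (s : Nat) :
    ∀ n, innerA (t.drop s) bc cc n = (lastBrk t bc cc s n).map (fun jc => (jc.1 - s, jc.2)) := by
  intro n
  induction n with
  | zero => simp [innerA, lastBrk]
  | succ n ih =>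
    simp only [innerA, lastBrk]
    rw [List.getElem?_drop]
    cases h : t[s + (n + 1)]? with
    | none =>
      simp [ih]
    | some ch =>
      by_cases hb : ch ∈ bc
      · simp [hb, Prod.ext_iff]
        omega
      · simp [hb, ih]

theorem mem_breaksOf (bset cset : List Char) :
    ∀ (t : List Char) (j i : Nat) (c : Bool),
      (i, c) ∈ breaksOf bset cset j t ↔
        ∃ (k : Nat) (ch : Char), i = j + k ∧ t[k]? = some ch ∧
          bset.contains ch = true ∧ c = cset.contains ch := by
  intro t
  induction t with
  | nil => intro j i c; simp [breaksOf]
  | cons ch0 rest ih =>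
    intro j i c
    by_cases hb : bset.contains ch0
    · simp only [breaksOf, if_pos hb, List.mem_cons, ih]
      constructor
      · rintro (heq | ⟨k, ch, hk, hget, hbc, hc⟩)
        · refine ⟨0, ch0, ?_, ?_, hb, ?_⟩ <;> simp_all [Prod.ext_iff]
        · exact ⟨k + 1, ch, by omega, by simpa using hget, hbc, hc⟩
      · rintro ⟨k, ch, hk, hget, hbc, hc⟩
        cases k with
        | zero =>
          left
          simp only [List.getElem?_cons_zero, Option.some.injEq] at hget
          subst hget
          have hij : i = j := by omega
          subst hij
          simp [hc]
        | succ k =>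
          right
          exact ⟨k, ch, by omega, by simpa using hget, hbc, hc⟩
    · simp only [breaksOf, if_neg hb, ih]
      constructor
      · rintro ⟨k, ch, hk, hget, hbc, hc⟩
        exact ⟨k + 1, ch, by omega, by simpa using hget, hbc, hc⟩
      · rintro ⟨k, ch, hk, hget, hbc, hc⟩
        cases k with
        | zero =>
          simp only [List.getElem?_cons_zero, Option.some.injEq] at hget
          subst hget
          exact absurd hbc (by simpa using hb)
        | succ k =>
          exact ⟨k, ch, by omega, by simpa using hget, hbc, hc⟩

theorem breaksOf_lb (bset cset : List Char) :
    ∀ (t : List Char) (j : Nat) (x : Nat × Bool), x ∈ breaksOf bset cset j t → j ≤ x.1 := by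
  intro t
  induction t with
  | nil => intro j x h; simp [breaksOf] at h
  | cons ch0 rest ih =>
    intro j x h
    by_cases hb : bset.contains ch0
    · simp only [breaksOf, if_pos hb, List.mem_cons] at h
      rcases h with h | h
      · subst h; simp
      · have := ih (j + 1) x h; omega
    · simp only [breaksOf, if_neg hb] at h
      have := ih (j + 1) x h; omega

theorem breaksOf_sorted (bset cset : List Char) :
    ∀ (t : List Char) (j : Nat), (breaksOf bset cset j t).Pairwise (fun a b => a.1 < b.1) := by
  intro t
  induction t with
  | nil => intro j; simp [breaksOf]
  | cons ch0 rest ih =>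
    intro j
    by_cases hb : bset.contains ch0
    · simp only [breaksOf, if_pos hb]
      refine List.Pairwise.cons ?_ (ih (j + 1))
      intro y hy
      have := breaksOf_lb bset cset rest (j + 1) y hy
      simpa using by omega
    · simp only [breaksOf, if_neg hb]
      exact ih (j + 1)

theorem advance_spec (breaks : List (Nat × Bool)) (limit : Nat) :
    ∀ (m p : Nat), breaks.length - p ≤ m → p ≤ breaks.length →
      (∀ q (hq : q < breaks.length), q < p → (breaks[q]).1 ≤ limit) →
      p ≤ advance breaks limit p ∧ advance breaks limit p ≤ breaks.length ∧
        (∀ q (hq : q < breaks.length), q < advance breaks limit p → (breaks[q]).1 ≤ limit) ∧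
        (∀ (h : advance breaks limit p < breaks.length), limit < (breaks[advance breaks limit p]).1) := by
  intro m
  induction m with
  | zero =>
    intro p hm hp hinv
    have hpe : p = breaks.length := by omega
    subst hpe
    rw [advance]
    simp only [dif_neg (lt_irrefl breaks.length)]
    exact ⟨le_refl _, le_refl _, fun q hq _ => hinv q hq hq, fun h => absurd h (lt_irrefl _)⟩
  | succ m ih =>
    intro p hm hp hinv
    rw [advance]
    by_cases hlt : p < breaks.length
    · simp only [dif_pos hlt]
      by_cases hle : (breaks[p]).1 ≤ limit
      · simp only [if_pos hle]
        have hinv' : ∀ q (hq : q < breaks.length), q < p + 1 → (breaks[q]).1 ≤ limit := by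
          intro q hq hq'
          rcases Nat.lt_or_ge q p with h | h
          · exact hinv q hq h
          · have : q = p := by omega
            subst this; exact hle
        have := ih (p + 1) (by omega) (by omega) hinv'
        exact ⟨by omega, this.2.1, this.2.2.1, this.2.2.2⟩
      · simp only [if_neg hle]
        exact ⟨le_refl _, by omega, hinv, fun h => by omega⟩
    · simp only [dif_neg hlt]
      exact ⟨le_refl _, by omega, hinv, fun h => absurd h hlt⟩

theorem cand_eq_lastBrk (t bc cc : List Char) (s p' : Nat)
    (hp : p' ≤ (breaksOf bc cc 0 t).length) :
    ∀ n, s + n < t.length →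
      (∀ q (hq : q < (breaksOf bc cc 0 t).length), q < p' → ((breaksOf bc cc 0 t)[q]).1 ≤ s + n) →
      (∀ (h : p' < (breaksOf bc cc 0 t).length), s + n < ((breaksOf bc cc 0 t)[p']).1) →
      (if p' ≠ 0 ∧ s < ((breaksOf bc cc 0 t).getD (p' - 1) (0, false)).1
        then some ((breaksOf bc cc 0 t).getD (p' - 1) (0, false)) else none)
        = lastBrk t bc cc s n := by
  intro n
  induction n with
  | zero =>
    intro hlen hinv hub
    rw [if_neg, lastBrk]
    rintro ⟨hne, hgt⟩
    have h1 : p' - 1 < (breaksOf bc cc 0 t).length := by omega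
    rw [List.getD_eq_getElem _ _ h1] at hgt
    have := hinv (p' - 1) h1 (by omega)
    omega
  | succ n ih =>
    intro hlen hinv hub
    have hidx : s + n + 1 < t.length := by omega
    have hget : t[s + n + 1]? = some (t[s + n + 1]) := List.getElem?_eq_getElem hidx
    rw [lastBrk, hget]
    show _ = if bc.contains t[s + n + 1] = true then some (s + n + 1, cc.contains t[s + n + 1])
             else lastBrk t bc cc s n
    have hpair := List.pairwise_iff_getElem.mp (breaksOf_sorted bc cc t 0)
    by_cases hb : bc.contains (t[s + n + 1]) = true
    · rw [if_pos hb]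
      have hmem : (s + n + 1, cc.contains (t[s + n + 1])) ∈ breaksOf bc cc 0 t :=
        (mem_breaksOf bc cc t 0 (s + n + 1) _).mpr ⟨s + n + 1, t[s + n + 1], by omega, hget, hb, rfl⟩
      obtain ⟨q, hq, hqe⟩ := List.mem_iff_getElem.mp hmem
      have hqlt : q < p' := by
        by_contra hge
        rw [not_lt] at hge
        have hplt : p' < (breaksOf bc cc 0 t).length := lt_of_le_of_lt hge hq
        have hle2 : ((breaksOf bc cc 0 t)[p']).1 ≤ ((breaksOf bc cc 0 t)[q]).1 := by
          rcases Nat.eq_or_lt_of_le hge with he | hlt'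
          · simp [he]
          · exact le_of_lt (hpair p' q hplt hq hlt')
        rw [hqe] at hle2
        have := hub hplt
        simp at hle2
        omega
      have hne : p' ≠ 0 := by omega
      have h1 : p' - 1 < (breaksOf bc cc 0 t).length := by omega
      have hD : (breaksOf bc cc 0 t).getD (p' - 1) (0, false) = (breaksOf bc cc 0 t)[p' - 1] :=
        List.getD_eq_getElem _ _ h1
      have ha : ((breaksOf bc cc 0 t)[p' - 1]).1 ≤ s + n + 1 := by
        have := hinv (p' - 1) h1 (by omega); omega
      have hb1 : s + n + 1 ≤ ((breaksOf bc cc 0 t)[p' - 1]).1 := by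
        rcases Nat.eq_or_lt_of_le (show q ≤ p' - 1 by omega) with he | hlt'
        · subst he
          simp [hqe]
        · have := hpair q (p' - 1) hq h1 hlt'
          rw [hqe] at this
          simp at this
          omega
      have hpos : ((breaksOf bc cc 0 t)[p' - 1]).1 = s + n + 1 := le_antisymm ha hb1
      have hmem2 : (breaksOf bc cc 0 t)[p' - 1] ∈ breaksOf bc cc 0 t := List.getElem_mem h1
      obtain ⟨k, ch', hk, hget', hbc', hc'⟩ :=
        (mem_breaksOf bc cc t 0 ((breaksOf bc cc 0 t)[p' - 1]).1 ((breaksOf bc cc 0 t)[p' - 1]).2).mp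
          (by rw [Prod.mk.eta]; exact hmem2)
      have hks : k = s + n + 1 := by omega
      subst hks
      rw [hget] at hget'
      injection hget' with hch
      subst hch
      rw [if_pos ⟨hne, by rw [hD, hpos]; omega⟩, hD]
      rw [Option.some_inj]
      have := Prod.mk.eta (p := (breaksOf bc cc 0 t)[p' - 1])
      rw [← this, hpos, hc']
    · rw [if_neg hb]
      have hinv' : ∀ q (hq : q < (breaksOf bc cc 0 t).length), q < p' →
          ((breaksOf bc cc 0 t)[q]).1 ≤ s + n := by
        intro q hq hql
        have h1 := hinv q hq hql
        rcases Nat.lt_or_ge ((breaksOf bc cc 0 t)[q]).1 (s + n + 1) with h | h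
        · omega
        · exfalso
          have heq : ((breaksOf bc cc 0 t)[q]).1 = s + n + 1 := by omega
          have hmem2 : (breaksOf bc cc 0 t)[q] ∈ breaksOf bc cc 0 t := List.getElem_mem hq
          obtain ⟨k, ch', hk, hget', hbc', hc'⟩ :=
            (mem_breaksOf bc cc t 0 ((breaksOf bc cc 0 t)[q]).1 ((breaksOf bc cc 0 t)[q]).2).mp
              (by rw [Prod.mk.eta]; exact hmem2)
          have hks : k = s + n + 1 := by omega
          subst hks
          rw [hget] at hget'
          injection hget' with hch
          subst hch
          exact hb hbc'
      have hub' : ∀ (h : p' < (breaksOf bc cc 0 t).length), s + n < ((breaksOf bc cc 0 t)[p']).1 := by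
        intro h
        have := hub h
        omega
      exact ih (by omega) hinv' hub'

theorem outer_eq (t bc cc : List Char) (size : Int)
    (hsz : 1 ≤ size ∨ (t.length : Int) ≤ size) :
    ∀ (fuel s p : Nat) (out : List (List Char)), s ≤ t.length → p ≤ (breaksOf bc cc 0 t).length →
      (∀ q (hq : q < (breaksOf bc cc 0 t).length), q < p → ((breaksOf bc cc 0 t)[q]).1 ≤ s) →
      outerA bc cc size fuel (t.drop s) out = outerB t size (breaksOf bc cc 0 t) fuel s p out := by
  intro fuel
  induction fuel with
  | zero => intro s p out hs hp hinv; simp [outerA, outerB]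
  | succ fuel ih =>
    intro s p out hs hp hinv
    simp only [outerA, outerB]
    by_cases hcond : (t.length : Int) - (s : Int) > size
    · rw [if_pos (by rw [List.length_drop]; omega : ((t.drop s).length : Int) > size), if_pos hcond]
      have hsz1 : 1 ≤ size := by
        rcases hsz with h | h
        · exact h
        · exfalso; omega
      have hnn : (size.toNat : Int) = size := Int.toNat_of_nonneg (by omega)
      have hn1 : 1 ≤ size.toNat := by omega
      have hsn : s + size.toNat < t.length := by omega
      obtain ⟨hple, hple2, hinv2, hub2⟩ :=
        advance_spec (breaksOf bc cc 0 t) (s + size.toNat) (breaksOf bc cc 0 t).length p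
          (by omega) hp (fun q hq hql => le_trans (hinv q hq hql) (by omega))
      have hcand := cand_eq_lastBrk t bc cc s (advance (breaksOf bc cc 0 t) (s + size.toNat) p)
        hple2 size.toNat hsn hinv2 hub2
      rw [innerA_eq_lastBrk t bc cc s size.toNat, ← hcand]
      by_cases hC : advance (breaksOf bc cc 0 t) (s + size.toNat) p ≠ 0 ∧
          s < ((breaksOf bc cc 0 t).getD (advance (breaksOf bc cc 0 t) (s + size.toNat) p - 1)
                (0, false)).1
      · set p' := advance (breaksOf bc cc 0 t) (s + size.toNat) p with hp'
        set cand := (breaksOf bc cc 0 t).getD (p' - 1) (0, false) with hcd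
        simp only [if_pos hC, Option.map_some]
        have h1 : p' - 1 < (breaksOf bc cc 0 t).length := by omega
        have hD : cand = (breaksOf bc cc 0 t)[p' - 1] := List.getD_eq_getElem _ _ h1
        have hslt : s < cand.1 := hC.2
        have hcub : cand.1 ≤ s + size.toNat := by
          rw [hD]; exact hinv2 (p' - 1) h1 (by omega)
        have he1 : s + (cand.1 - s + 1) = cand.1 + 1 := by omega
        have he2 : cand.1 - s + 1 - (if cand.2 then 1 else 0)
            = cand.1 + 1 - (if cand.2 then 1 else 0) - s := by
          split <;> omega
        rw [List.drop_drop, he1, he2]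
        have hinv' : ∀ q (hq : q < (breaksOf bc cc 0 t).length), q < p' →
            ((breaksOf bc cc 0 t)[q]).1 ≤ cand.1 + 1 := by
          intro q hq hql
          rcases Nat.eq_or_lt_of_le (show q ≤ p' - 1 by omega) with he | hlt'
          · subst he
            rw [hD]
            omega
          · have := List.pairwise_iff_getElem.mp (breaksOf_sorted bc cc t 0) q (p' - 1) hq h1 hlt'
            rw [← hD] at this
            omega
        exact ih (cand.1 + 1) p' _ (by omega) hple2 hinv'
      · simp only [if_neg hC, Option.map_none]
        have he3 : size.toNat - 1 + 1 = size.toNat := by omega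
        have he4 : s + size.toNat - s = size.toNat := by omega
        rw [List.drop_drop, he3, he4]
        exact ih (s + size.toNat) (advance (breaksOf bc cc 0 t) (s + size.toNat) p) _
          (by omega) hple2 hinv2
    · rw [if_neg (by rw [List.length_drop]; omega : ¬ ((t.drop s).length : Int) > size),
          if_neg hcond]

theorem breaksOf_congr (b1 c1 b2 c2 : List Char)
    (hb : ∀ ch, b1.contains ch = b2.contains ch) (hc : ∀ ch, c1.contains ch = c2.contains ch) :
    ∀ (t : List Char) (j : Nat), breaksOf b1 c1 j t = breaksOf b2 c2 j t := by
  intro t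
  induction t with
  | nil => intro j; rfl
  | cons ch0 rest ih => intro j; simp only [breaksOf, hb, hc, ih]

-- ===== VERDICT (by name: the statement is the Claim_ definition above) =====
theorem contains_union_ofList (b c : List Char) :
    ∀ ch : Char, (PySem.Set.union (PySem.Set.ofList b) c).contains ch = (b ++ c).contains ch := by
  intro ch
  rw [Bool.eq_iff_iff]
  simp [PySem.Set.mem_union, PySem.Set.mem_ofList]

theorem contains_ofList (c : List Char) :
    ∀ ch : Char, (PySem.Set.ofList c).contains ch = c.contains ch := by
  intro ch
  rw [Bool.eq_iff_iff]
  simp [PySem.Set.mem_ofList]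

theorem break_string_spec : Claim_equal_break_string := by
  intro text size break_char cut_char hdom hpre
  unfold Spec_break_string
  unfold Pre_break_string at hpre
  simp only [break_string, break_string_alt]
  rw [breaksOf_congr _ _ (break_char.toList ++ cut_char.toList) cut_char.toList
    (contains_union_ofList break_char.toList cut_char.toList)
    (contains_ofList cut_char.toList)]
  refine congrArg _ (congrArg _ ?_)
  have h := outer_eq text.toList (break_char.toList ++ cut_char.toList) cut_char.toList size hpre
    (text.toList.length + 1) 0 0 [] (by omega) (by omega) (by intro q hq hql; omega)
  rwa [List.drop_zero] at h
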